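-- pv_equiv track=rewrite | github.com/Sucryan/GameTheory-115-2 | 314581030_HW1/src/checker.py | compute_matching_edges
-- ===== SOURCE A (Python) =====
-- from typing import Any, Optional
--
-- def compute_matching_edges(state: list[Optional[int]]) -> set[tuple[int, int]]:
--     """Build matching edges from mutual choices only.
--
--     Edge tuples are normalized to (min(i, j), max(i, j)).
--     """
--     edges: set[tuple[int, int]] = set()
--     n = len(state)
--     for i in range(n):
--         j = state[i]
--         if j is None:
--             continue
--         if not (0 <= j < n):
--             continue
--         if state[j] == i:
--             edges.add((min(i, j), max(i, j)))
--     return edges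
-- ===== SOURCE B (Python) =====
-- from typing import Optional
--
-- def compute_matching_edges(state: list[Optional[int]]) -> set[tuple[int, int]]:
--     """Two-pass: materialize the directed-choice set, then intersect it with its transpose."""
--     n = len(state)
--     directed = set()
--     for i in range(n):
--         j = state[i]
--         if j is not None and 0 <= j < n:
--             directed.add((i, j))
--     edges = set()
--     for (a, b) in directed:
--         if (b, a) in directed:
--             edges.add((min(a, b), max(a, b)))
--     return edges
-- ===== Notes on version B (the rewrite author's own statement) =====
-- stated objective: alternative
-- what changed: A checks mutuality index-by-index in one loop over range(n); B first materializes the set of valid directed choices as a distinct pass, then scans that set (not the indices) and keeps each pair whose transpose is also in the set.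
import Mathlib
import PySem

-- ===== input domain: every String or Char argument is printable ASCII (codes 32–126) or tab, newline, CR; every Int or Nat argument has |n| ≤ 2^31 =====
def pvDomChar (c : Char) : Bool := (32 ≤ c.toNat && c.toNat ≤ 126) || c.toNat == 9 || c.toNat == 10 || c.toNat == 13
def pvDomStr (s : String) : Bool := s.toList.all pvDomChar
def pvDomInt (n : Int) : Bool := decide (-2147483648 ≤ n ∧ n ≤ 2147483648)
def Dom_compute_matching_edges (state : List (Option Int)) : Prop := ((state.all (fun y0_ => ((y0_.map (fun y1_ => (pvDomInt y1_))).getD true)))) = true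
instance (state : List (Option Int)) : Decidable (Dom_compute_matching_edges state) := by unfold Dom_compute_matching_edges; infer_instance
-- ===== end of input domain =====

-- B replaces A's index-by-index mutual check with a two-pass shape: first materialize
-- the set of directed choices, then scan that set intersecting it with its transpose
-- (objective: alternative decomposition, same O(n) cost).

-- ===== PORT A =====
-- loop body of A (one iteration of 'for i in range(n)')
def aStep (state : List (Option Int)) (edges : PySem.Set (Int × Int)) (i : Int) : PySem.Set (Int × Int) :=
  match PySem.List.pyGetD state i none with
  | none => edges                                        -- if j is None: continue
  | some j =>
    if 0 ≤ j ∧ j < PySem.List.len state then             -- if not (0 <= j < n): continue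
      (if PySem.List.pyGetD state j none = some i        -- state[j] == i
       then PySem.Set.add edges (min i j, max i j)
       else edges)
    else edges

def compute_matching_edges (state : List (Option Int)) : List (Int × Int) :=
  (PySem.List.pyRange 0 (PySem.List.len state) 1).foldl (aStep state) PySem.Set.empty

-- ===== PORT B =====
-- first pass: record the directed choice at index i, if valid
def bDirStep (state : List (Option Int)) (d : PySem.Set (Int × Int)) (i : Int) : PySem.Set (Int × Int) :=
  match PySem.List.pyGetD state i none with
  | some j => if 0 ≤ j ∧ j < PySem.List.len state then PySem.Set.add d (i, j) else d
  | none => d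

-- second pass: keep a directed choice whose transpose is also in the set
def bEdgeStep (directed : PySem.Set (Int × Int)) (edges : PySem.Set (Int × Int)) (p : Int × Int) : PySem.Set (Int × Int) :=
  if PySem.Set.contains directed (p.2, p.1)
  then PySem.Set.add edges (min p.1 p.2, max p.1 p.2)
  else edges

def compute_matching_edges_alt (state : List (Option Int)) : List (Int × Int) :=
  let directed : PySem.Set (Int × Int) :=
    (PySem.List.pyRange 0 (PySem.List.len state) 1).foldl (bDirStep state) PySem.Set.empty
  directed.foldl (bEdgeStep directed) PySem.Set.empty

-- ===== PRECONDITION & SPEC =====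
def Spec_compute_matching_edges (state : List (Option Int)) (out : List (Int × Int)) : Prop := out = compute_matching_edges_alt state
instance (state : List (Option Int)) (out : List (Int × Int)) : Decidable (Spec_compute_matching_edges state out) := by unfold Spec_compute_matching_edges; infer_instance

-- ===== CLAIM (what is proved, stated in full; the proofs are below) =====
def Claim_equal_compute_matching_edges : Prop := ∀ (state : List (Option Int)), Dom_compute_matching_edges state → Spec_compute_matching_edges state (compute_matching_edges state)

-- ===== LEMMAS AND PROOFS =====

-- the directed choice made at index a, if any (proof-side characterisation of B\'s first pass)
def dstep (state : List (Option Int)) (a : Nat) : Option (Int × Int) :=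
  match state[a]? with
  | some (some b) => if 0 ≤ b ∧ b < (state.length : Int) then some ((a : Int), b) else none
  | _ => none

def dlist (state : List (Option Int)) (k : Nat) : List (Int × Int) :=
  (List.range k).filterMap (dstep state)

theorem mem_dlist {state : List (Option Int)} {k : Nat} {p : Int × Int}
    (h : p ∈ dlist state k) :
    ∃ a : Nat, a < k ∧ p.1 = (a : Int) ∧ state[a]? = some (some p.2) ∧
      0 ≤ p.2 ∧ p.2 < (state.length : Int) := by
  rcases List.mem_filterMap.mp h with ⟨a, ha, hstep⟩
  refine ⟨a, List.mem_range.mp ha, ?_⟩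
  unfold dstep at hstep
  rcases hget : state[a]? with _ | v
  · simp [hget] at hstep
  · rcases v with _ | b
    · simp [hget] at hstep
    · simp only [hget] at hstep
      split_ifs at hstep with hb
      injection hstep with hp
      subst hp
      exact ⟨rfl, rfl, hb.1, hb.2⟩

theorem fst_lt_of_mem_dlist {state : List (Option Int)} {k : Nat} {p : Int × Int}
    (h : p ∈ dlist state k) : p.1 < (k : Int) := by
  rcases mem_dlist h with ⟨a, hak, hfst, -⟩
  simpa [hfst] using (Int.ofNat_lt.mpr hak)

theorem dlist_succ (state : List (Option Int)) (k : Nat) :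
    dlist state (k+1) = dlist state k ++ ((dstep state k).toList) := by
  rw [dlist, dlist, List.range_succ, List.filterMap_append]
  cases h : dstep state k <;> simp [h]

theorem pyGetD_at_nat (state : List (Option Int)) (k : Nat) :
    PySem.List.pyGetD state (k : Int) (none : Option Int) = (state[k]?).getD none := by
  simp [PySem.List.pyGetD_natCast, List.getD_eq_getElem?_getD]

-- membership test used by B\'s second pass, characterised on elements of the full directed set
theorem contains_dlist_iff (state : List (Option Int)) (p : Int × Int)
    (hp : p ∈ dlist state state.length) :
    (PySem.Set.contains (dlist state state.length) (p.2, p.1) = true) ↔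
      PySem.List.pyGetD state p.2 none = some p.1 := by
  rcases mem_dlist hp with ⟨a, ha, hfst, hget, hb0, hbn⟩
  have hblen : p.2.toNat < state.length := by omega
  have hgetD : PySem.List.pyGetD state p.2 (none : Option Int) = state[p.2.toNat] :=
    PySem.List.pyGetD_eq_getElem (xs := state) (i := p.2) (d := (none : Option Int)) hb0 hbn
  rw [PySem.Set.contains_iff]
  constructor
  · intro hmem
    rcases mem_dlist hmem with ⟨c, hck, hc1, hcget, -⟩
    have hc : c = p.2.toNat := by simp at hc1; omega
    subst hc
    rw [hgetD]
    rw [List.getElem?_eq_getElem hblen] at hcget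
    simp_all
  · intro hv
    apply List.mem_filterMap.mpr
    refine ⟨p.2.toNat, List.mem_range.mpr hblen, ?_⟩
    unfold dstep
    rw [List.getElem?_eq_getElem hblen, ← hgetD, hv]
    have h1 : (0:Int) ≤ p.1 := by omega
    have h2 : p.1 < (state.length : Int) := by omega
    simp [h1, h2, hb0]

-- B\'s first pass computes dlist
theorem first_pass_eq (state : List (Option Int)) (k : Nat) :
    (List.range k).foldl (fun d (a : Nat) => bDirStep state d (a : Int)) [] = dlist state k := by
  induction k with
  | zero => simp [dlist]
  | succ k ih =>
    rw [List.range_succ, List.foldl_append, ih, dlist_succ]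
    simp only [List.foldl_cons, List.foldl_nil, bDirStep]
    rw [pyGetD_at_nat]
    rcases hget : state[k]? with _ | v
    · simp [hget, dstep]
    · rcases v with _ | b
      · simp [hget, dstep]
      · simp only [hget, Option.getD_some, dstep, PySem.List.len_eq]
        by_cases hb : 0 ≤ b ∧ b < (state.length : Int)
        · rw [if_pos hb, if_pos hb, PySem.Set.add_of_not_mem]
          · simp
          · intro hmem
            have := fst_lt_of_mem_dlist hmem
            simp at this
        · rw [if_neg hb, if_neg hb]
          simp

-- A\'s single pass over indices equals B\'s second pass over dlist
theorem second_pass_eq (state : List (Option Int)) (k : Nat) (hk : k ≤ state.length)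
    (acc : List (Int × Int)) :
    (List.range k).foldl (fun edges (a : Nat) => aStep state edges (a : Int)) acc
    = (dlist state k).foldl (bEdgeStep (dlist state state.length)) acc := by
  induction k with
  | zero => simp [dlist]
  | succ k ih =>
    have hk' : k ≤ state.length := Nat.le_of_succ_le hk
    rw [List.range_succ, List.foldl_append, ih hk', dlist_succ, List.foldl_append]
    simp only [List.foldl_cons, List.foldl_nil, aStep]
    rw [pyGetD_at_nat]
    rcases hget : state[k]? with _ | v
    · simp [hget, dstep]
    · rcases v with _ | b
      · simp [hget, dstep]
      · simp only [hget, Option.getD_some, dstep, PySem.List.len_eq]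
        by_cases hb : 0 ≤ b ∧ b < (state.length : Int)
        · rw [if_pos hb, if_pos hb]
          have hmem : ((k : Int), b) ∈ dlist state state.length := by
            apply List.mem_filterMap.mpr
            refine ⟨k, List.mem_range.mpr (by omega), ?_⟩
            unfold dstep
            rw [hget]
            simp [hb.1, hb.2]
          have hiff := contains_dlist_iff state ((k : Int), b) hmem
          simp only [Option.toList_some, List.foldl_cons, List.foldl_nil, bEdgeStep]
          by_cases hc : PySem.List.pyGetD state b none = some (k : Int)
          · rw [if_pos hc, if_pos (hiff.mpr hc)]
          · rw [if_neg hc, if_neg (fun h => hc (hiff.mp h))]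
        · rw [if_neg hb, if_neg hb]
          simp

theorem ports_eq (state : List (Option Int)) :
    compute_matching_edges state = compute_matching_edges_alt state := by
  have hrange : PySem.List.pyRange 0 ((state.length : Int)) 1
      = (List.range state.length).map (fun a : Nat => (a : Int)) := by
    rw [PySem.List.pyRange_one]
    simp
  simp only [compute_matching_edges, compute_matching_edges_alt, PySem.List.len_eq,
    hrange, List.foldl_map, PySem.Set.empty]
  rw [first_pass_eq state state.length,
      second_pass_eq state state.length (le_refl _) []]

-- ===== VERDICT (by name: the statement is the Claim_ definition above) =====
theorem compute_matching_edges_spec : Claim_equal_compute_matching_edges := by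
  intro state _
  unfold Spec_compute_matching_edges
  exact ports_eq state
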